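-- pv_equiv track=rewrite | github.com/RohanRajeevKumar/Sickle-Cell-Disease-Detection-using-ML | FeaturedExtraction.py | extract_area_perim
-- ===== SOURCE A (Python) =====
-- def numofneighbour(mat, i, j, searchValue):
--     count = 0
--     if (i > 0 and mat[i - 1][j] == searchValue):
--         count += 1
--     if (j > 0 and mat[i][j - 1] == searchValue):
--         count += 1
--     if (i < len(mat) - 1 and mat[i + 1][j] == searchValue):
--         count += 1
--     if (j < len(mat[i]) - 1 and mat[i][j + 1] == searchValue):
--         count += 1
--     return count
--
-- def findperimeter(mat, num_features):
--     perimeter = [0] * (num_features + 1)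
--     for i in range(len(mat)):
--         for j in range(len(mat[i])):
--             if (mat[i][j] != 0):
--                 perimeter[mat[i][j]] += (4 - numofneighbour(mat, i, j, mat[i][j]))
--     return perimeter
--
-- def extract_area_perim(img, num_features):
--     area = [0] * (num_features + 1)
--     for i in range(len(img)):
--         for j in range(len(img[i])):
--             value = img[i][j]
--             if (value != 0):
--                 area[value] += 1
--     return area, findperimeter(img, num_features)
-- ===== SOURCE B (Python) =====
-- def extract_area_perim(img, num_features):
--     # One grid scan: tally per-label area and adjacent equal (right/down) pairs,
--     # then perimeter[v] = 4*area[v] - 2*adjacent_pairs[v].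
--     area = [0] * (num_features + 1)
--     adj = [0] * (num_features + 1)
--     n = len(img)
--     for i in range(n):
--         row = img[i]
--         m = len(row)
--         for j in range(m):
--             v = row[j]
--             if v != 0:
--                 area[v] += 1
--                 if j + 1 < m and row[j + 1] == v:
--                     adj[v] += 1
--                 if i + 1 < n and img[i + 1][j] == v:
--                     adj[v] += 1
--     perimeter = [4 * a - 2 * c for a, c in zip(area, adj)]
--     return area, perimeter
-- ===== Notes on version B (the rewrite author's own statement) =====
-- stated objective: alternative
-- what changed: Replaces A's second full grid pass that probes all 4 neighbours of every nonzero cell with a single scan that counts adjacent equal right/down pairs alongside the area tally, computing perimeter[v] = 4*area[v] - 2*adjacent_pairs[v].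
import Mathlib
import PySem

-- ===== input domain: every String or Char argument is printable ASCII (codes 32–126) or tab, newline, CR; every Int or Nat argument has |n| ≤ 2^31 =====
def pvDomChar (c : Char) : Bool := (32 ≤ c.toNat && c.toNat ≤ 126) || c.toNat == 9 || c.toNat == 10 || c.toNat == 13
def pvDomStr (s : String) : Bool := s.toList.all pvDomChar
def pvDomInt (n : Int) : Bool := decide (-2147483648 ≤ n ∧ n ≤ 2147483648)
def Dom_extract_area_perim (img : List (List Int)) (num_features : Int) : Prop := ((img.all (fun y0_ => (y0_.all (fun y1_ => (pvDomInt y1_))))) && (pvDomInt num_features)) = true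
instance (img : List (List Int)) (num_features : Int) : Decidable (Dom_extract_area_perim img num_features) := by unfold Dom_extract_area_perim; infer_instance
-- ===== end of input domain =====

-- B replaces A's second full grid pass with 4-neighbour probing per cell by counting adjacent
-- equal (right/down) pairs during the single area scan and computing perimeter[v] = 4*area[v] - 2*pairs[v].

-- ===== PORT A =====
-- mat[i][j] for Nat indices; out of range (where Python raises IndexError, excluded by Pre_) yields 0.
def pvGet2 (mat : List (List Int)) (i j : Nat) : Int := (mat.getD i []).getD j 0

-- l[v] += d with Python's negative-index wraparound; out of range (Python IndexError, excluded
-- by Pre_) is a no-op. Exact on every access Pre_ admits.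
def pvBump (l : List Int) (v d : Int) : List Int :=
  let i : Int := if v < 0 then v + l.length else v
  if 0 ≤ i ∧ i < l.length then l.set i.toNat (l.getD i.toNat 0 + d) else l

-- Python's 'j < len(..) - 1' is written as 'j + 1 < len(..)' (equal over Python ints; Nat-subtraction safe).
def numofneighbour (mat : List (List Int)) (i j : Nat) (searchValue : Int) : Int :=
  (if 0 < i ∧ pvGet2 mat (i-1) j = searchValue then 1 else 0)
  + (if 0 < j ∧ pvGet2 mat i (j-1) = searchValue then 1 else 0)
  + (if i + 1 < mat.length ∧ pvGet2 mat (i+1) j = searchValue then 1 else 0)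
  + (if j + 1 < (mat.getD i []).length ∧ pvGet2 mat i (j+1) = searchValue then 1 else 0)

def findperimeter (mat : List (List Int)) (num_features : Int) : List Int :=
  (List.range mat.length).foldl (fun per i =>
    (List.range (mat.getD i []).length).foldl (fun per j =>
      if pvGet2 mat i j ≠ 0 then
        pvBump per (pvGet2 mat i j) (4 - numofneighbour mat i j (pvGet2 mat i j))
      else per) per)
    (List.replicate (num_features + 1).toNat 0)

def extract_area_perim (img : List (List Int)) (num_features : Int) : List Int × List Int :=
  let area := (List.range img.length).foldl (fun area i =>
    (List.range (img.getD i []).length).foldl (fun area j =>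
      if pvGet2 img i j ≠ 0 then pvBump area (pvGet2 img i j) 1 else area) area)
    (List.replicate (num_features + 1).toNat 0)
  (area, findperimeter img num_features)

-- ===== PORT B =====
def extract_area_perim_alt (img : List (List Int)) (num_features : Int) : List Int × List Int :=
  let n := img.length
  let init := List.replicate (num_features + 1).toNat 0
  let st := (List.range n).foldl (fun (st : List Int × List Int) i =>
      let row := img.getD i []
      (List.range row.length).foldl (fun (st : List Int × List Int) j =>
        let v := row.getD j 0
        if v ≠ 0 then
          let area := pvBump st.1 v 1
          let adj := if j + 1 < row.length ∧ row.getD (j+1) 0 = v then pvBump st.2 v 1 else st.2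
          let adj := if i + 1 < n ∧ pvGet2 img (i+1) j = v then pvBump adj v 1 else adj
          (area, adj)
        else st) st) (init, init)
  (st.1, List.zipWith (fun a c => 4*a - 2*c) st.1 st.2)

-- ===== PRECONDITION & SPEC =====
-- Exactly the inputs on which the Python A returns normally: every nonzero label must be an
-- in-range index for the [0]*(num_features+1) tallies (Python's negative wraparound included),
-- and its up/down neighbour accesses must be in range in ragged grids (else A raises IndexError).
def Pre_extract_area_perim (img : List (List Int)) (num_features : Int) : Prop :=
  ∀ i ∈ List.range img.length, ∀ j ∈ List.range (img.getD i []).length,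
    pvGet2 img i j ≠ 0 →
      (-(num_features + 1) ≤ pvGet2 img i j ∧ pvGet2 img i j ≤ num_features) ∧
      (0 < i → j < (img.getD (i-1) []).length) ∧
      (i + 1 < img.length → j < (img.getD (i+1) []).length)
instance (img : List (List Int)) (num_features : Int) : Decidable (Pre_extract_area_perim img num_features) := by unfold Pre_extract_area_perim; infer_instance

def pvWitness_extract_area_perim : List (List Int) × Int := ([[1, 2], [0, 1]], 2)

def Spec_extract_area_perim (img : List (List Int)) (num_features : Int) (out : List Int × List Int) : Prop := out = extract_area_perim_alt img num_features
instance (img : List (List Int)) (num_features : Int) (out : List Int × List Int) : Decidable (Spec_extract_area_perim img num_features out) := by unfold Spec_extract_area_perim; infer_instance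

-- ===== CLAIM (what is proved, stated in full; the proofs are below) =====
def Claim_equal_extract_area_perim : Prop := ∀ (img : List (List Int)) (num_features : Int), Dom_extract_area_perim img num_features → Pre_extract_area_perim img num_features → Spec_extract_area_perim img num_features (extract_area_perim img num_features)

-- ===== LEMMAS AND PROOFS =====

-- effective index pvBump l v d writes to, for a list of length N (none = no-op/IndexError)
def pvIx (N : Nat) (v : Int) : Option Nat :=
  let i : Int := if v < 0 then v + N else v
  if 0 ≤ i ∧ i < N then some i.toNat else none

def pvInd (c : Prop) [Decidable c] : Int := if c then 1 else 0

def rsum (f : Nat → Int) (n : Nat) : Int := ((List.range n).map f).sum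

lemma pvInd_congr {c d : Prop} [Decidable c] [Decidable d] (h : c ↔ d) : pvInd c = pvInd d := by
  simp [pvInd, h]

lemma pvBump_length (l : List Int) (v d : Int) : (pvBump l v d).length = l.length := by
  unfold pvBump
  dsimp only
  generalize (if v < 0 then v + (l.length : Int) else v) = i
  split <;> simp

lemma pvBump_getD (l : List Int) (v d : Int) (k : Nat) (hk : k < l.length) :
    (pvBump l v d).getD k 0 = l.getD k 0 + (if pvIx l.length v = some k then d else 0) := by
  unfold pvBump pvIx
  dsimp only
  generalize (if v < 0 then v + (l.length : Int) else v) = i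
  by_cases h : 0 ≤ i ∧ i < (l.length : Int)
  · rw [if_pos h, if_pos h]
    rw [List.getD_eq_getElem _ _ (by simpa using hk), List.getElem_set]
    by_cases hk2 : i.toNat = k
    · simp [hk2, List.getD_eq_getElem _ _ hk]
    · simp [hk2, List.getElem?_eq_getElem hk]
  · rw [if_neg h, if_neg h]
    simp


lemma rsum_succ_front (f : Nat → Int) (n : Nat) :
    rsum f (n+1) = f 0 + rsum (fun j => f (j+1)) n := by
  unfold rsum
  rw [List.range_succ_eq_map]
  simp [List.map_map, Function.comp_def]

lemma rsum_congr {f g : Nat → Int} {n : Nat} (h : ∀ j, j < n → f j = g j) :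
    rsum f n = rsum g n := by
  unfold rsum
  rw [List.map_congr_left (fun x hx => h x (List.mem_range.mp hx))]

lemma rsum_eq_zero {f : Nat → Int} {n : Nat} (h : ∀ j, j < n → f j = 0) : rsum f n = 0 := by
  rw [rsum_congr h]; unfold rsum; simp

lemma rsum_const_zero (n : Nat) : rsum (fun _ => (0:Int)) n = 0 := by simp [rsum]

lemma rsum_add (f g : Nat → Int) (n : Nat) :
    rsum (fun j => f j + g j) n = rsum f n + rsum g n := by
  induction n with
  | zero => rfl
  | succ m ih => unfold rsum at *; rw [List.range_succ] at *; simp at *; omega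



-- generic: a fold of length-preserving steps with additive per-index effect
lemma foldl_len {α : Type} (step : List Int → α → List Int) (N : Nat)
    (hlen : ∀ l x, l.length = N → (step l x).length = N) :
    ∀ (xs : List α) (init : List Int), init.length = N → (xs.foldl step init).length = N := by
  intro xs
  induction xs with
  | nil => intro init h; exact h
  | cons x t ih => intro init h; exact ih _ (hlen _ _ h)

lemma foldl_getD {α : Type} (step : List Int → α → List Int) (N : Nat) (g : α → Nat → Int)
    (hlen : ∀ l x, l.length = N → (step l x).length = N)
    (heff : ∀ l x k, l.length = N → k < N → (step l x).getD k 0 = l.getD k 0 + g x k) :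
    ∀ (xs : List α) (init : List Int), init.length = N → ∀ k, k < N →
      (xs.foldl step init).getD k 0 = init.getD k 0 + ((xs.map (fun x => g x k)).sum) := by
  intro xs
  induction xs with
  | nil => intro init h k hk; simp
  | cons x t ih =>
    intro init h k hk
    simp only [List.foldl_cons, List.map_cons, List.sum_cons]
    rw [ih _ (hlen _ _ h) k hk, heff _ _ _ h hk]
    ring

-- pairs: a fold whose step acts componentwise splits
lemma foldl_pair {α β γ : Type} (f : β → α → β) (g : γ → α → γ) (xs : List α) (p : β × γ) :
    xs.foldl (fun st x => (f st.1 x, g st.2 x)) p = (xs.foldl f p.1, xs.foldl g p.2) := by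
  induction xs generalizing p with
  | nil => rfl
  | cons x t ih => simp [ih]

-- ---- named step functions (proof-side views of the ports' folds) ----
def fAreaIn (img : List (List Int)) (i : Nat) (a : List Int) (j : Nat) : List Int :=
  if pvGet2 img i j ≠ 0 then pvBump a (pvGet2 img i j) 1 else a
def fAreaOut (img : List (List Int)) (a : List Int) (i : Nat) : List Int :=
  (List.range (img.getD i []).length).foldl (fAreaIn img i) a
def fPerIn (img : List (List Int)) (i : Nat) (p : List Int) (j : Nat) : List Int :=
  if pvGet2 img i j ≠ 0 then pvBump p (pvGet2 img i j) (4 - numofneighbour img i j (pvGet2 img i j)) else p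
def fPerOut (img : List (List Int)) (p : List Int) (i : Nat) : List Int :=
  (List.range (img.getD i []).length).foldl (fPerIn img i) p
def fAdjIn (img : List (List Int)) (i : Nat) (c : List Int) (j : Nat) : List Int :=
  if pvGet2 img i j ≠ 0 then
    (if i + 1 < img.length ∧ pvGet2 img (i+1) j = pvGet2 img i j then
       pvBump (if j + 1 < (img.getD i []).length ∧ pvGet2 img i (j+1) = pvGet2 img i j then pvBump c (pvGet2 img i j) 1 else c) (pvGet2 img i j) 1
     else (if j + 1 < (img.getD i []).length ∧ pvGet2 img i (j+1) = pvGet2 img i j then pvBump c (pvGet2 img i j) 1 else c))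
  else c
def fAdjOut (img : List (List Int)) (c : List Int) (i : Nat) : List Int :=
  (List.range (img.getD i []).length).foldl (fAdjIn img i) c

lemma A_eq_folds (img : List (List Int)) (nf : Int) :
    extract_area_perim img nf =
      ((List.range img.length).foldl (fAreaOut img) (List.replicate (nf + 1).toNat 0),
       (List.range img.length).foldl (fPerOut img) (List.replicate (nf + 1).toNat 0)) := rfl

lemma B_eq_folds (img : List (List Int)) (nf : Int) :
    extract_area_perim_alt img nf =
      (let area := (List.range img.length).foldl (fAreaOut img) (List.replicate (nf + 1).toNat 0)
       let adj := (List.range img.length).foldl (fAdjOut img) (List.replicate (nf + 1).toNat 0)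
       (area, List.zipWith (fun a c => 4*a - 2*c) area adj)) := by
  unfold extract_area_perim_alt
  have hin : ∀ i : Nat, (fun (st : List Int × List Int) j =>
        let v := (img.getD i []).getD j 0
        if v ≠ 0 then
          let area := pvBump st.1 v 1
          let adj := if j + 1 < (img.getD i []).length ∧ (img.getD i []).getD (j+1) 0 = v then pvBump st.2 v 1 else st.2
          let adj := if i + 1 < img.length ∧ pvGet2 img (i+1) j = v then pvBump adj v 1 else adj
          (area, adj)
        else st)
      = (fun (st : List Int × List Int) j => (fAreaIn img i st.1 j, fAdjIn img i st.2 j)) := by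
    intro i
    funext st j
    show (if pvGet2 img i j ≠ 0 then _ else st) = _
    unfold fAreaIn fAdjIn
    by_cases h : pvGet2 img i j ≠ 0 <;> simp [pvGet2, h] <;> simp [pvGet2] at h <;> simp [h]
  have houter : (fun (st : List Int × List Int) i =>
        (List.range (img.getD i []).length).foldl (fun st j => (fAreaIn img i st.1 j, fAdjIn img i st.2 j)) st)
      = (fun (st : List Int × List Int) i => (fAreaOut img st.1 i, fAdjOut img st.2 i)) := by
    funext st i
    exact foldl_pair (fAreaIn img i) (fAdjIn img i) _ st
  simp only [hin, houter]
  rw [foldl_pair]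

-- ---- per-index closed forms ----
lemma getD_replicate_zero (N k : Nat) (hk : k < N) : (List.replicate N (0:Int)).getD k 0 = 0 := by
  rw [List.getD_eq_getElem _ _ (by simpa using hk)]; simp

lemma area_len (img : List (List Int)) (N : Nat) (l : List Int) (h : l.length = N) :
    ((List.range img.length).foldl (fAreaOut img) l).length = N := by
  refine foldl_len _ N ?_ _ _ h
  intro l i hl
  refine foldl_len _ N ?_ _ _ hl
  intro l' j hl'
  unfold fAreaIn; split <;> simp [pvBump_length, hl']

lemma per_len (img : List (List Int)) (N : Nat) (l : List Int) (h : l.length = N) :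
    ((List.range img.length).foldl (fPerOut img) l).length = N := by
  refine foldl_len _ N ?_ _ _ h
  intro l i hl
  refine foldl_len _ N ?_ _ _ hl
  intro l' j hl'
  unfold fPerIn; split <;> simp [pvBump_length, hl']

lemma adj_len (img : List (List Int)) (N : Nat) (l : List Int) (h : l.length = N) :
    ((List.range img.length).foldl (fAdjOut img) l).length = N := by
  refine foldl_len _ N ?_ _ _ h
  intro l i hl
  refine foldl_len _ N ?_ _ _ hl
  intro l' j hl'
  unfold fAdjIn
  split
  · split <;> split <;> simp [pvBump_length, hl']
  · exact hl'

-- per-cell indicators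
def gArea (N : Nat) (img : List (List Int)) (k i j : Nat) : Int :=
  pvInd (pvGet2 img i j ≠ 0 ∧ pvIx N (pvGet2 img i j) = some k)
def gPer (N : Nat) (img : List (List Int)) (k i j : Nat) : Int :=
  if pvGet2 img i j ≠ 0 ∧ pvIx N (pvGet2 img i j) = some k then
    4 - numofneighbour img i j (pvGet2 img i j) else 0
def gAdj (N : Nat) (img : List (List Int)) (k i j : Nat) : Int :=
  pvInd (pvGet2 img i j ≠ 0 ∧ (j + 1 < (img.getD i []).length ∧ pvGet2 img i (j+1) = pvGet2 img i j) ∧ pvIx N (pvGet2 img i j) = some k)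
  + pvInd (pvGet2 img i j ≠ 0 ∧ (i + 1 < img.length ∧ pvGet2 img (i+1) j = pvGet2 img i j) ∧ pvIx N (pvGet2 img i j) = some k)

lemma areaIn_len (img : List (List Int)) (N : Nat) (i : Nat) :
    ∀ (l' : List Int) (j : Nat), l'.length = N → (fAreaIn img i l' j).length = N := by
  intro l' j hl'; unfold fAreaIn; split <;> simp [pvBump_length, hl']

lemma areaIn_eff (img : List (List Int)) (N : Nat) (i : Nat) :
    ∀ (l' : List Int) (j k' : Nat), l'.length = N → k' < N →
      (fAreaIn img i l' j).getD k' 0 = l'.getD k' 0 + gArea N img k' i j := by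
  intro l' j k' hl' hk'
  unfold fAreaIn gArea pvInd
  by_cases h0 : pvGet2 img i j ≠ 0
  · rw [if_pos h0, pvBump_getD _ _ _ _ (by rw [hl']; exact hk'), hl']
    by_cases hx : pvIx N (pvGet2 img i j) = some k' <;> simp [hx, h0]
  · simp [h0]

lemma area_getD (img : List (List Int)) (N : Nat) (l : List Int) (h : l.length = N) (k : Nat) (hk : k < N) :
    ((List.range img.length).foldl (fAreaOut img) l).getD k 0
      = l.getD k 0 + rsum (fun i => rsum (gArea N img k i) (img.getD i []).length) img.length := by
  refine foldl_getD _ N (fun i kk => rsum (gArea N img kk i) (img.getD i []).length) ?_ ?_ _ _ h k hk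
  · intro l' i hl'; exact foldl_len _ N (areaIn_len img N i) _ _ hl'
  · intro l' i k' hl' hk'
    exact foldl_getD _ N (fun j kk => gArea N img kk i j) (areaIn_len img N i) (areaIn_eff img N i) _ _ hl' k' hk'

lemma perIn_len (img : List (List Int)) (N : Nat) (i : Nat) :
    ∀ (l' : List Int) (j : Nat), l'.length = N → (fPerIn img i l' j).length = N := by
  intro l' j hl'; unfold fPerIn; split <;> simp [pvBump_length, hl']

lemma perIn_eff (img : List (List Int)) (N : Nat) (i : Nat) :
    ∀ (l' : List Int) (j k' : Nat), l'.length = N → k' < N →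
      (fPerIn img i l' j).getD k' 0 = l'.getD k' 0 + gPer N img k' i j := by
  intro l' j k' hl' hk'
  unfold fPerIn gPer
  by_cases h0 : pvGet2 img i j ≠ 0
  · rw [if_pos h0, pvBump_getD _ _ _ _ (by rw [hl']; exact hk'), hl']
    by_cases hx : pvIx N (pvGet2 img i j) = some k' <;> simp [hx, h0]
  · simp [h0]

lemma per_getD (img : List (List Int)) (N : Nat) (l : List Int) (h : l.length = N) (k : Nat) (hk : k < N) :
    ((List.range img.length).foldl (fPerOut img) l).getD k 0
      = l.getD k 0 + rsum (fun i => rsum (gPer N img k i) (img.getD i []).length) img.length := by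
  refine foldl_getD _ N (fun i kk => rsum (gPer N img kk i) (img.getD i []).length) ?_ ?_ _ _ h k hk
  · intro l' i hl'; exact foldl_len _ N (perIn_len img N i) _ _ hl'
  · intro l' i k' hl' hk'
    exact foldl_getD _ N (fun j kk => gPer N img kk i j) (perIn_len img N i) (perIn_eff img N i) _ _ hl' k' hk'

lemma adjIn_len (img : List (List Int)) (N : Nat) (i : Nat) :
    ∀ (l' : List Int) (j : Nat), l'.length = N → (fAdjIn img i l' j).length = N := by
  intro l' j hl'
  unfold fAdjIn
  split
  · split <;> split <;> simp [pvBump_length, hl']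
  · exact hl'

lemma adjIn_eff (img : List (List Int)) (N : Nat) (i : Nat) :
    ∀ (l' : List Int) (j k' : Nat), l'.length = N → k' < N →
      (fAdjIn img i l' j).getD k' 0 = l'.getD k' 0 + gAdj N img k' i j := by
  intro l' j k' hl' hk'
  unfold fAdjIn gAdj pvInd
  by_cases h0 : pvGet2 img i j ≠ 0
  · rw [if_pos h0]
    by_cases hr : j + 1 < (img.getD i []).length ∧ pvGet2 img i (j+1) = pvGet2 img i j <;>
    by_cases hd : i + 1 < img.length ∧ pvGet2 img (i+1) j = pvGet2 img i j
    · rw [if_pos hd, if_pos hr,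
        pvBump_getD _ _ _ _ (by rw [pvBump_length, hl']; exact hk'),
        pvBump_getD _ _ _ _ (by rw [hl']; exact hk'), pvBump_length, hl']
      by_cases hx : pvIx N (pvGet2 img i j) = some k'
      · rw [if_pos hx, if_pos (⟨h0, hr, hx⟩ : _ ∧ _ ∧ _), if_pos (⟨h0, hd, hx⟩ : _ ∧ _ ∧ _)]; ring
      · rw [if_neg hx, if_neg (fun hc => hx hc.2.2), if_neg (fun hc => hx hc.2.2)]; ring
    · rw [if_neg hd, if_pos hr, pvBump_getD _ _ _ _ (by rw [hl']; exact hk'), hl']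
      by_cases hx : pvIx N (pvGet2 img i j) = some k'
      · rw [if_pos hx, if_pos (⟨h0, hr, hx⟩ : _ ∧ _ ∧ _), if_neg (fun hc => hd hc.2.1)]; ring
      · rw [if_neg hx, if_neg (fun hc => hx hc.2.2), if_neg (fun hc => hx hc.2.2)]; ring
    · rw [if_pos hd, if_neg hr, pvBump_getD _ _ _ _ (by rw [hl']; exact hk'), hl']
      by_cases hx : pvIx N (pvGet2 img i j) = some k'
      · rw [if_pos hx, if_neg (fun hc => hr hc.2.1), if_pos (⟨h0, hd, hx⟩ : _ ∧ _ ∧ _)]; ring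
      · rw [if_neg hx, if_neg (fun hc => hx hc.2.2), if_neg (fun hc => hx hc.2.2)]; ring
    · rw [if_neg hd, if_neg hr, if_neg (fun hc => hr hc.2.1), if_neg (fun hc => hd hc.2.1)]
      ring
  · simp [h0]

lemma adj_getD (img : List (List Int)) (N : Nat) (l : List Int) (h : l.length = N) (k : Nat) (hk : k < N) :
    ((List.range img.length).foldl (fAdjOut img) l).getD k 0
      = l.getD k 0 + rsum (fun i => rsum (gAdj N img k i) (img.getD i []).length) img.length := by
  refine foldl_getD _ N (fun i kk => rsum (gAdj N img kk i) (img.getD i []).length) ?_ ?_ _ _ h k hk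
  · intro l' i hl'; exact foldl_len _ N (adjIn_len img N i) _ _ hl'
  · intro l' i k' hl' hk'
    exact foldl_getD _ N (fun j kk => gAdj N img kk i j) (adjIn_len img N i) (adjIn_eff img N i) _ _ hl' k' hk'

-- ---- the combinatorial identity ----
def gU (N : Nat) (img : List (List Int)) (k i j : Nat) : Int :=
  pvInd (pvGet2 img i j ≠ 0 ∧ pvIx N (pvGet2 img i j) = some k ∧ 0 < i ∧ pvGet2 img (i-1) j = pvGet2 img i j)
def gL (N : Nat) (img : List (List Int)) (k i j : Nat) : Int :=
  pvInd (pvGet2 img i j ≠ 0 ∧ pvIx N (pvGet2 img i j) = some k ∧ 0 < j ∧ pvGet2 img i (j-1) = pvGet2 img i j)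
def gD (N : Nat) (img : List (List Int)) (k i j : Nat) : Int :=
  pvInd (pvGet2 img i j ≠ 0 ∧ pvIx N (pvGet2 img i j) = some k ∧ i + 1 < img.length ∧ pvGet2 img (i+1) j = pvGet2 img i j)
def gR (N : Nat) (img : List (List Int)) (k i j : Nat) : Int :=
  pvInd (pvGet2 img i j ≠ 0 ∧ pvIx N (pvGet2 img i j) = some k ∧ j + 1 < (img.getD i []).length ∧ pvGet2 img i (j+1) = pvGet2 img i j)

lemma pvInd_true {c : Prop} [Decidable c] (h : c) : pvInd c = 1 := by simp [pvInd, h]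
lemma pvInd_false {c : Prop} [Decidable c] (h : ¬ c) : pvInd c = 0 := by simp [pvInd, h]

lemma cell_decomp (N : Nat) (img : List (List Int)) (k i j : Nat) :
    gPer N img k i j
      = 4 * gArea N img k i j - gU N img k i j - gL N img k i j - gD N img k i j - gR N img k i j := by
  unfold gPer gArea gU gL gD gR
  by_cases hq : pvGet2 img i j ≠ 0 ∧ pvIx N (pvGet2 img i j) = some k
  · obtain ⟨h0, hx⟩ := hq
    rw [if_pos ⟨h0, hx⟩, pvInd_true ⟨h0, hx⟩,
      pvInd_congr (show (pvGet2 img i j ≠ 0 ∧ pvIx N (pvGet2 img i j) = some k ∧ 0 < i ∧ pvGet2 img (i-1) j = pvGet2 img i j) ↔ (0 < i ∧ pvGet2 img (i-1) j = pvGet2 img i j) by tauto),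
      pvInd_congr (show (pvGet2 img i j ≠ 0 ∧ pvIx N (pvGet2 img i j) = some k ∧ 0 < j ∧ pvGet2 img i (j-1) = pvGet2 img i j) ↔ (0 < j ∧ pvGet2 img i (j-1) = pvGet2 img i j) by tauto),
      pvInd_congr (show (pvGet2 img i j ≠ 0 ∧ pvIx N (pvGet2 img i j) = some k ∧ i + 1 < img.length ∧ pvGet2 img (i+1) j = pvGet2 img i j) ↔ (i + 1 < img.length ∧ pvGet2 img (i+1) j = pvGet2 img i j) by tauto),
      pvInd_congr (show (pvGet2 img i j ≠ 0 ∧ pvIx N (pvGet2 img i j) = some k ∧ j + 1 < (img.getD i []).length ∧ pvGet2 img i (j+1) = pvGet2 img i j) ↔ (j + 1 < (img.getD i []).length ∧ pvGet2 img i (j+1) = pvGet2 img i j) by tauto)]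
    unfold numofneighbour pvInd
    split_ifs <;> ring
  · rw [if_neg hq, pvInd_false hq,
      pvInd_false (show ¬ (pvGet2 img i j ≠ 0 ∧ pvIx N (pvGet2 img i j) = some k ∧ 0 < i ∧ pvGet2 img (i-1) j = pvGet2 img i j) from fun hc => hq ⟨hc.1, hc.2.1⟩),
      pvInd_false (show ¬ (pvGet2 img i j ≠ 0 ∧ pvIx N (pvGet2 img i j) = some k ∧ 0 < j ∧ pvGet2 img i (j-1) = pvGet2 img i j) from fun hc => hq ⟨hc.1, hc.2.1⟩),
      pvInd_false (show ¬ (pvGet2 img i j ≠ 0 ∧ pvIx N (pvGet2 img i j) = some k ∧ i + 1 < img.length ∧ pvGet2 img (i+1) j = pvGet2 img i j) from fun hc => hq ⟨hc.1, hc.2.1⟩),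
      pvInd_false (show ¬ (pvGet2 img i j ≠ 0 ∧ pvIx N (pvGet2 img i j) = some k ∧ j + 1 < (img.getD i []).length ∧ pvGet2 img i (j+1) = pvGet2 img i j) from fun hc => hq ⟨hc.1, hc.2.1⟩)]
    ring

lemma adj_decomp (N : Nat) (img : List (List Int)) (k i j : Nat) :
    gAdj N img k i j = gR N img k i j + gD N img k i j := by
  unfold gAdj gR gD
  rw [pvInd_congr (by tauto :
      (pvGet2 img i j ≠ 0 ∧ (j + 1 < (img.getD i []).length ∧ pvGet2 img i (j+1) = pvGet2 img i j) ∧ pvIx N (pvGet2 img i j) = some k)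
        ↔ (pvGet2 img i j ≠ 0 ∧ pvIx N (pvGet2 img i j) = some k ∧ j + 1 < (img.getD i []).length ∧ pvGet2 img i (j+1) = pvGet2 img i j)),
    pvInd_congr (by tauto :
      (pvGet2 img i j ≠ 0 ∧ (i + 1 < img.length ∧ pvGet2 img (i+1) j = pvGet2 img i j) ∧ pvIx N (pvGet2 img i j) = some k)
        ↔ (pvGet2 img i j ≠ 0 ∧ pvIx N (pvGet2 img i j) = some k ∧ i + 1 < img.length ∧ pvGet2 img (i+1) j = pvGet2 img i j))]

-- horizontal shift: within one row, left-matches equal right-matches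
def hp (Q : Int → Prop) [DecidablePred Q] : Int → List Int → Int
  | _, [] => 0
  | a, b :: t => pvInd (Q b ∧ a = b) + hp Q b t

def hq (Q : Int → Prop) [DecidablePred Q] : List Int → Int
  | [] => 0
  | a :: t => (match t with | [] => 0 | b :: _ => pvInd (Q a ∧ b = a)) + hq Q t

lemma hshift_auxL (Q : Int → Prop) [DecidablePred Q] :
    ∀ (t : List Int) (a : Int),
      rsum (fun j => pvInd (Q (t.getD j 0) ∧ (if j = 0 then a else t.getD (j-1) 0) = t.getD j 0)) t.length
        = hp Q a t := by
  intro t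
  induction t with
  | nil => intro a; rfl
  | cons b t ih =>
    intro a
    rw [show (b :: t).length = t.length + 1 from rfl, rsum_succ_front]
    have h2 : (fun j => pvInd (Q ((b :: t).getD (j+1) 0) ∧ (if j+1 = 0 then a else (b :: t).getD (j+1-1) 0) = (b :: t).getD (j+1) 0))
         = (fun j => pvInd (Q (t.getD j 0) ∧ (if j = 0 then b else t.getD (j-1) 0) = t.getD j 0)) := by
      funext j
      cases j with
      | zero => simp
      | succ m => simp
    rw [h2, ih b]
    simp [hp]

lemma hshift_auxR (Q : Int → Prop) [DecidablePred Q] :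
    ∀ (r : List Int),
      rsum (fun j => pvInd (Q (r.getD j 0) ∧ j + 1 < r.length ∧ r.getD (j+1) 0 = r.getD j 0)) r.length
        = hq Q r := by
  intro r
  induction r with
  | nil => rfl
  | cons a t ih =>
    rw [show (a :: t).length = t.length + 1 from rfl, rsum_succ_front]
    have h2 : (fun j => pvInd (Q ((a :: t).getD (j+1) 0) ∧ j + 1 + 1 < t.length + 1 ∧ (a :: t).getD (j+1+1) 0 = (a :: t).getD (j+1) 0))
         = (fun j => pvInd (Q (t.getD j 0) ∧ j + 1 < t.length ∧ t.getD (j+1) 0 = t.getD j 0)) := by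
      funext j
      simp
    rw [h2, ih]
    cases t with
    | nil => simp [hq, pvInd]
    | cons b t' => simp [hq, pvInd]

lemma hp_eq_hq (Q : Int → Prop) [DecidablePred Q] :
    ∀ (t : List Int) (a : Int), hp Q a t = hq Q (a :: t) := by
  intro t
  induction t with
  | nil => intro a; rfl
  | cons b t' ih =>
    intro a
    show pvInd (Q b ∧ a = b) + hp Q b t' = pvInd (Q a ∧ b = a) + hq Q (b :: t')
    rw [ih b, pvInd_congr (by constructor <;> (rintro ⟨h1, h2⟩; subst h2; exact ⟨h1, rfl⟩) :
      (Q b ∧ a = b) ↔ (Q a ∧ b = a))]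

lemma hshift (Q : Int → Prop) [DecidablePred Q] (r : List Int) :
    rsum (fun j => pvInd (Q (r.getD j 0) ∧ 0 < j ∧ r.getD (j-1) 0 = r.getD j 0)) r.length
      = rsum (fun j => pvInd (Q (r.getD j 0) ∧ j + 1 < r.length ∧ r.getD (j+1) 0 = r.getD j 0)) r.length := by
  rw [hshift_auxR]
  cases r with
  | nil => rfl
  | cons a t =>
    rw [← hp_eq_hq, ← hshift_auxL Q t a]
    rw [show (a :: t).length = t.length + 1 from rfl, rsum_succ_front]
    have h1 : pvInd (Q ((a :: t).getD 0 0) ∧ 0 < 0 ∧ (a :: t).getD (0-1) 0 = (a :: t).getD 0 0) = 0 := by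
      simp [pvInd]
    have h2 : (fun j => pvInd (Q ((a :: t).getD (j+1) 0) ∧ 0 < j + 1 ∧ (a :: t).getD (j+1-1) 0 = (a :: t).getD (j+1) 0))
         = (fun j => pvInd (Q (t.getD j 0) ∧ (if j = 0 then a else t.getD (j-1) 0) = t.getD j 0)) := by
      funext j
      cases j with
      | zero => simp
      | succ m => simp
    rw [h1, h2, zero_add]

-- vertical shift: matches against the row above equal matches against the row below
def W (Q : Int → Prop) [DecidablePred Q] (r s : List Int) : Int :=
  rsum (fun j => pvInd (Q (s.getD j 0) ∧ r.getD j 0 = s.getD j 0)) s.length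

lemma W_nil_right (Q : Int → Prop) [DecidablePred Q] (r : List Int) : W Q r [] = 0 := rfl

lemma W_nil_left (Q : Int → Prop) [DecidablePred Q] (hQ0 : ¬ Q 0) (s : List Int) : W Q [] s = 0 := by
  apply rsum_eq_zero
  intro j hj
  have : ([] : List Int).getD j 0 = 0 := by simp
  rw [this]
  unfold pvInd
  rw [if_neg]
  rintro ⟨h1, h2⟩
  rw [← h2] at h1
  exact hQ0 h1

lemma W_cons (Q : Int → Prop) [DecidablePred Q] (a b : Int) (r s : List Int) :
    W Q (a :: r) (b :: s) = pvInd (Q b ∧ a = b) + W Q r s := by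
  unfold W
  rw [show (b :: s).length = s.length + 1 from rfl, rsum_succ_front]
  have h2 : (fun j => pvInd (Q ((b :: s).getD (j+1) 0) ∧ (a :: r).getD (j+1) 0 = (b :: s).getD (j+1) 0))
       = (fun j => pvInd (Q (s.getD j 0) ∧ r.getD j 0 = s.getD j 0)) := by
    funext j; simp
  rw [h2]
  simp

lemma W_symm (Q : Int → Prop) [DecidablePred Q] (hQ0 : ¬ Q 0) :
    ∀ (r s : List Int), W Q r s = W Q s r := by
  intro r
  induction r with
  | nil => intro s; rw [W_nil_left Q hQ0, W_nil_right]
  | cons a r' ih =>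
    intro s
    cases s with
    | nil => rw [W_nil_left Q hQ0, W_nil_right]
    | cons b s' =>
      rw [W_cons, W_cons, ih s', pvInd_congr (by constructor <;> (rintro ⟨h1, h2⟩; subst h2; exact ⟨h1, rfl⟩) :
        (Q b ∧ a = b) ↔ (Q a ∧ b = a))]

def uaux (Q : Int → Prop) [DecidablePred Q] (p : List Int) (m : List (List Int)) : Int :=
  rsum (fun i => W Q ((p :: m).getD i []) (m.getD i [])) m.length

def dsum (Q : Int → Prop) [DecidablePred Q] : List (List Int) → Int
  | [] => 0
  | r :: m => (match m with | [] => 0 | s :: _ => W Q s r) + dsum Q m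

lemma uaux_cons (Q : Int → Prop) [DecidablePred Q] (p s : List Int) (m : List (List Int)) :
    uaux Q p (s :: m) = W Q p s + uaux Q s m := by
  unfold uaux
  rw [show (s :: m).length = m.length + 1 from rfl, rsum_succ_front]
  have h2 : (fun i => W Q ((p :: s :: m).getD (i+1) []) ((s :: m).getD (i+1) []))
       = (fun i => W Q ((s :: m).getD i []) (m.getD i [])) := by
    funext i; simp
  rw [h2]
  simp

lemma uaux_eq_dsum (Q : Int → Prop) [DecidablePred Q] (hQ0 : ¬ Q 0) :
    ∀ (m : List (List Int)) (p : List Int), uaux Q p m = dsum Q (p :: m) := by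
  intro m
  induction m with
  | nil => intro p; rfl
  | cons s m' ih =>
    intro p
    rw [uaux_cons, ih s]
    show W Q p s + dsum Q (s :: m') = W Q s p + dsum Q (s :: m')
    rw [W_symm Q hQ0]

lemma vshift (Q : Int → Prop) [DecidablePred Q] (hQ0 : ¬ Q 0) (m : List (List Int)) :
    rsum (fun i => rsum (fun j => pvInd (Q ((m.getD i []).getD j 0) ∧ 0 < i ∧ (m.getD (i-1) []).getD j 0 = (m.getD i []).getD j 0)) (m.getD i []).length) m.length
      = rsum (fun i => rsum (fun j => pvInd (Q ((m.getD i []).getD j 0) ∧ i + 1 < m.length ∧ (m.getD (i+1) []).getD j 0 = (m.getD i []).getD j 0)) (m.getD i []).length) m.length := by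
  -- right side equals dsum
  have hR : ∀ (m : List (List Int)),
      rsum (fun i => rsum (fun j => pvInd (Q ((m.getD i []).getD j 0) ∧ i + 1 < m.length ∧ (m.getD (i+1) []).getD j 0 = (m.getD i []).getD j 0)) (m.getD i []).length) m.length
        = dsum Q m := by
    intro m
    induction m with
    | nil => rfl
    | cons r m' ih =>
      rw [show (r :: m').length = m'.length + 1 from rfl, rsum_succ_front]
      have h2 : (fun i => rsum (fun j => pvInd (Q (((r :: m').getD (i+1) []).getD j 0) ∧ i + 1 + 1 < m'.length + 1 ∧ ((r :: m').getD (i+1+1) []).getD j 0 = ((r :: m').getD (i+1) []).getD j 0)) ((r :: m').getD (i+1) []).length)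
           = (fun i => rsum (fun j => pvInd (Q ((m'.getD i []).getD j 0) ∧ i + 1 < m'.length ∧ (m'.getD (i+1) []).getD j 0 = (m'.getD i []).getD j 0)) (m'.getD i []).length) := by
        funext i
        simp
      rw [h2, ih]
      cases m' with
      | nil => simp [dsum, pvInd, rsum_const_zero]
      | cons s m'' => simp [dsum, W, pvInd]
  -- left side equals uaux of the tail
  rw [hR]
  cases m with
  | nil => rfl
  | cons a t =>
    rw [← uaux_eq_dsum Q hQ0 t a]
    rw [show (a :: t).length = t.length + 1 from rfl, rsum_succ_front]
    have h1 : rsum (fun j => pvInd (Q (((a :: t).getD 0 []).getD j 0) ∧ 0 < 0 ∧ ((a :: t).getD (0-1) []).getD j 0 = ((a :: t).getD 0 []).getD j 0)) ((a :: t).getD 0 []).length = 0 := by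
      apply rsum_eq_zero
      intro j hj
      simp [pvInd]
    have h2 : (fun i => rsum (fun j => pvInd (Q (((a :: t).getD (i+1) []).getD j 0) ∧ 0 < i + 1 ∧ ((a :: t).getD (i+1-1) []).getD j 0 = ((a :: t).getD (i+1) []).getD j 0)) ((a :: t).getD (i+1) []).length)
         = (fun i => W Q ((a :: t).getD i []) (t.getD i [])) := by
      funext i
      unfold W
      have : (a :: t).getD (i+1) [] = t.getD i [] := by simp
      rw [this]
      apply rsum_congr
      intro j hj
      apply pvInd_congr
      simp
    rw [h1, h2, zero_add]
    rfl

lemma rsum_decomp5 (A B C D E : Nat → Int) (n : Nat) :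
    rsum (fun x => 4 * A x - B x - C x - D x - E x) n
      = 4 * rsum A n - rsum B n - rsum C n - rsum D n - rsum E n := by
  induction n with
  | zero => simp [rsum]
  | succ m ih => unfold rsum at *; rw [List.range_succ] at *; simp at *; rw [ih]; ring

lemma grid_identity (img : List (List Int)) (N : Nat) (k : Nat) :
    rsum (fun i => rsum (gPer N img k i) (img.getD i []).length) img.length
      = 4 * rsum (fun i => rsum (gArea N img k i) (img.getD i []).length) img.length
        - 2 * rsum (fun i => rsum (gAdj N img k i) (img.getD i []).length) img.length := by
  have hQ0 : ¬ ((0:Int) ≠ 0 ∧ pvIx N (0:Int) = some k) := by simp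
  -- decompose the perimeter sum
  have hP : rsum (fun i => rsum (gPer N img k i) (img.getD i []).length) img.length
      = 4 * rsum (fun i => rsum (gArea N img k i) (img.getD i []).length) img.length
        - rsum (fun i => rsum (gU N img k i) (img.getD i []).length) img.length
        - rsum (fun i => rsum (gL N img k i) (img.getD i []).length) img.length
        - rsum (fun i => rsum (gD N img k i) (img.getD i []).length) img.length
        - rsum (fun i => rsum (gR N img k i) (img.getD i []).length) img.length := by
    rw [rsum_congr (fun i _ => by
      rw [rsum_congr (fun j _ => cell_decomp N img k i j), rsum_decomp5])]
    exact rsum_decomp5 _ _ _ _ _ _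
  -- decompose the adjacency sum
  have hC : rsum (fun i => rsum (gAdj N img k i) (img.getD i []).length) img.length
      = rsum (fun i => rsum (gR N img k i) (img.getD i []).length) img.length
        + rsum (fun i => rsum (gD N img k i) (img.getD i []).length) img.length := by
    rw [rsum_congr (fun i _ => by
      rw [rsum_congr (fun j _ => adj_decomp N img k i j), rsum_add])]
    exact rsum_add _ _ _
  -- left matches = right matches (within each row)
  have hLR : rsum (fun i => rsum (gL N img k i) (img.getD i []).length) img.length
      = rsum (fun i => rsum (gR N img k i) (img.getD i []).length) img.length := by
    apply rsum_congr
    intro i _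
    have h1 : rsum (gL N img k i) (img.getD i []).length
        = rsum (fun j => pvInd ((fun v => v ≠ 0 ∧ pvIx N v = some k) ((img.getD i []).getD j 0) ∧ 0 < j ∧ (img.getD i []).getD (j-1) 0 = (img.getD i []).getD j 0)) (img.getD i []).length := by
      apply rsum_congr; intro j _; unfold gL pvGet2; apply pvInd_congr; tauto
    have h2 : rsum (gR N img k i) (img.getD i []).length
        = rsum (fun j => pvInd ((fun v => v ≠ 0 ∧ pvIx N v = some k) ((img.getD i []).getD j 0) ∧ j + 1 < (img.getD i []).length ∧ (img.getD i []).getD (j+1) 0 = (img.getD i []).getD j 0)) (img.getD i []).length := by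
      apply rsum_congr; intro j _; unfold gR pvGet2; apply pvInd_congr; tauto
    rw [h1, h2]
    exact hshift (fun v => v ≠ 0 ∧ pvIx N v = some k) (img.getD i [])
  -- up matches = down matches (across adjacent rows)
  have hUD : rsum (fun i => rsum (gU N img k i) (img.getD i []).length) img.length
      = rsum (fun i => rsum (gD N img k i) (img.getD i []).length) img.length := by
    have h1 : rsum (fun i => rsum (gU N img k i) (img.getD i []).length) img.length
        = rsum (fun i => rsum (fun j => pvInd ((fun v => v ≠ 0 ∧ pvIx N v = some k) ((img.getD i []).getD j 0) ∧ 0 < i ∧ (img.getD (i-1) []).getD j 0 = (img.getD i []).getD j 0)) (img.getD i []).length) img.length := by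
      apply rsum_congr; intro i _; apply rsum_congr; intro j _; unfold gU pvGet2; apply pvInd_congr; tauto
    have h2 : rsum (fun i => rsum (gD N img k i) (img.getD i []).length) img.length
        = rsum (fun i => rsum (fun j => pvInd ((fun v => v ≠ 0 ∧ pvIx N v = some k) ((img.getD i []).getD j 0) ∧ i + 1 < img.length ∧ (img.getD (i+1) []).getD j 0 = (img.getD i []).getD j 0)) (img.getD i []).length) img.length := by
      apply rsum_congr; intro i _; apply rsum_congr; intro j _; unfold gD pvGet2; apply pvInd_congr; tauto
    rw [h1, h2]
    exact vshift (fun v => v ≠ 0 ∧ pvIx N v = some k) hQ0 img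
  rw [hP, hC, hLR, hUD]
  ring

-- ---- main equivalence ----
lemma getD_ext (l1 l2 : List Int) (hlen : l1.length = l2.length)
    (h : ∀ k, k < l1.length → l1.getD k 0 = l2.getD k 0) : l1 = l2 := by
  apply List.ext_getElem hlen
  intro k h1 h2
  have := h k h1
  rwa [List.getD_eq_getElem _ _ h1, List.getD_eq_getElem _ _ h2] at this

theorem main_eq (img : List (List Int)) (nf : Int) :
    extract_area_perim img nf = extract_area_perim_alt img nf := by
  rw [A_eq_folds, B_eq_folds]
  dsimp only
  congr 1
  have hinit : (List.replicate (nf+1).toNat (0:Int)).length = (nf+1).toNat := by simp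
  have lenP := per_len img (nf+1).toNat _ hinit
  have lenA := area_len img (nf+1).toNat _ hinit
  have lenC := adj_len img (nf+1).toNat _ hinit
  have lenZ : (List.zipWith (fun a c => 4*a - 2*c)
      ((List.range img.length).foldl (fAreaOut img) (List.replicate (nf + 1).toNat 0))
      ((List.range img.length).foldl (fAdjOut img) (List.replicate (nf + 1).toNat 0))).length = (nf+1).toNat := by
    simp [List.length_zipWith, lenA, lenC]
  apply getD_ext _ _ (by rw [lenP, lenZ])
  intro k hkl
  have hk : k < (nf+1).toNat := by rw [← lenP]; exact hkl
  have hzip : (List.zipWith (fun a c => 4*a - 2*c)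
      ((List.range img.length).foldl (fAreaOut img) (List.replicate (nf + 1).toNat 0))
      ((List.range img.length).foldl (fAdjOut img) (List.replicate (nf + 1).toNat 0))).getD k 0
      = 4 * ((List.range img.length).foldl (fAreaOut img) (List.replicate (nf + 1).toNat 0)).getD k 0
        - 2 * ((List.range img.length).foldl (fAdjOut img) (List.replicate (nf + 1).toNat 0)).getD k 0 := by
    rw [List.getD_eq_getElem _ _ (by rw [lenZ]; exact hk), List.getElem_zipWith,
        List.getD_eq_getElem _ _ (by rw [lenA]; exact hk), List.getD_eq_getElem _ _ (by rw [lenC]; exact hk)]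
  rw [hzip, per_getD img (nf+1).toNat _ hinit k hk, area_getD img (nf+1).toNat _ hinit k hk,
      adj_getD img (nf+1).toNat _ hinit k hk, getD_replicate_zero _ _ hk, grid_identity img (nf+1).toNat k]
  ring

-- ===== VERDICT (by name: the statement is the Claim_ definition above) =====
theorem extract_area_perim_spec : Claim_equal_extract_area_perim := by
  intro img nf _ _
  exact main_eq img nf
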